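-- pv_equiv track=rewrite | github.com/sovaai/sova-devkit | sovaKit/handlers/spotter.py | get_activation_intervals
-- ===== SOURCE A (Python) =====
-- def get_activation_intervals(timeline, block_stride, block_size):
--     timeline.append(False)
--     intervals = []
--
--     start = end = 0
--     prev = False
--     for i, pred in enumerate(timeline):
--         if pred and not prev:
--             start = i * block_stride
--         elif not pred and prev:
--             end = i * block_stride + block_size
--             intervals.append([start, end])
--             start = end = 0
--
--         prev = pred
--
--     return intervals
-- ===== SOURCE B (Python) =====
-- def get_activation_intervals(timeline, block_stride, block_size):
--     timeline.append(False)
--     intervals = []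
--     n = len(timeline)
--     i = 0
--     while i < n:
--         if timeline[i]:
--             s = i
--             while timeline[i]:
--                 i += 1
--             intervals.append([s * block_stride, i * block_stride + block_size])
--         else:
--             i += 1
--     return intervals
-- ===== Notes on version B (the rewrite author's own statement) =====
-- stated objective: alternative
-- what changed: Replaced the edge-detecting prev/pred state machine with a runs-based scan: an outer index loop that, on hitting a True block, consumes the whole True run with an inner loop and emits the interval directly from the run's start and end indices.
import Mathlib
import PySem

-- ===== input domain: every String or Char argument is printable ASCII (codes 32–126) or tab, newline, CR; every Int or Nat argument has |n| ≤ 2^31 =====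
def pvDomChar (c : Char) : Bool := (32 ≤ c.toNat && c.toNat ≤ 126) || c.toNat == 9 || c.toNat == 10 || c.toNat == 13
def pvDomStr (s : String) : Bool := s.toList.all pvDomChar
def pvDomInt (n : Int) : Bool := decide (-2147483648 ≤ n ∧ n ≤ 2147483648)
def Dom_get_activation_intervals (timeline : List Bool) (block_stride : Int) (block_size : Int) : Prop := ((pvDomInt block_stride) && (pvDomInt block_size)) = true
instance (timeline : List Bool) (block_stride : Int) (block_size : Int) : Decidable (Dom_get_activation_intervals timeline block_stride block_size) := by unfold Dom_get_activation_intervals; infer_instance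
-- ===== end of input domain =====

-- B replaces A's edge-detecting prev/pred state machine with a runs-based scan (consume each
-- True run, emitting its interval directly); equivalence is about the return value — both
-- Pythons perform the same mutation timeline.append(False), modelled here as '++ [false]'.

-- ===== PORT A =====
-- A's for-loop over enumerate(timeline) after timeline.append(False), carried as recursion
-- over the list with the same state (intervals, start, end, prev) and the index i.
def pvAGo (l : List Bool) (i : Nat) (bs bsz : Int) (intervals : List (List Int))
    (start e : Int) (prev : Bool) : List (List Int) :=
  match l with
  | [] => intervals
  | pred :: rest =>
    if pred && !prev then
      pvAGo rest (i + 1) bs bsz intervals ((i : Int) * bs) e pred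
    else if !pred && prev then
      pvAGo rest (i + 1) bs bsz (intervals ++ [[start, (i : Int) * bs + bsz]]) 0 0 pred
    else
      pvAGo rest (i + 1) bs bsz intervals start e pred

def get_activation_intervals (timeline : List Bool) (block_stride : Int) (block_size : Int) : List (List Int) :=
  pvAGo (timeline ++ [false]) 0 block_stride block_size [] 0 0 false

-- ===== PORT B =====
-- length of the leading run of True (B's inner 'while timeline[i]: i += 1')
def pvRunLen : List Bool → Nat
  | true :: r => pvRunLen r + 1
  | _ => 0

-- B's outer index loop over the (appended) timeline, as recursion on the list suffix at index i
def pvBGo (l : List Bool) (i : Nat) (bs bsz : Int) : List (List Int) :=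
  match l with
  | [] => []
  | b :: rest =>
    if b then
      let k := pvRunLen rest
      [(i : Int) * bs, ((i + 1 + k : Nat) : Int) * bs + bsz] :: pvBGo (rest.drop k) (i + 1 + k) bs bsz
    else
      pvBGo rest (i + 1) bs bsz
termination_by l.length
decreasing_by
  · simp
  · simp

def get_activation_intervals_alt (timeline : List Bool) (block_stride : Int) (block_size : Int) : List (List Int) :=
  pvBGo (timeline ++ [false]) 0 block_stride block_size

-- ===== PRECONDITION & SPEC =====
def Spec_get_activation_intervals (timeline : List Bool) (block_stride : Int) (block_size : Int) (out : List (List Int)) : Prop := out = get_activation_intervals_alt timeline block_stride block_size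
instance (timeline : List Bool) (block_stride : Int) (block_size : Int) (out : List (List Int)) : Decidable (Spec_get_activation_intervals timeline block_stride block_size out) := by unfold Spec_get_activation_intervals; infer_instance

-- ===== CLAIM (what is proved, stated in full; the proofs are below) =====
def Claim_equal_get_activation_intervals : Prop := ∀ (timeline : List Bool) (block_stride : Int) (block_size : Int), Dom_get_activation_intervals timeline block_stride block_size → Spec_get_activation_intervals timeline block_stride block_size (get_activation_intervals timeline block_stride block_size)

-- ===== LEMMAS AND PROOFS =====

-- in a list ending in false, the leading True run is followed by a false
theorem drop_runLen (l : List Bool) (h : l.getLast? = some false) :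
    l.drop (pvRunLen l) = false :: l.drop (pvRunLen l + 1) := by
  induction l with
  | nil => simp at h
  | cons b r ih =>
    cases b with
    | false => simp [pvRunLen]
    | true =>
      have hr : r ≠ [] := by rintro rfl; simp at h
      obtain ⟨c, r', rfl⟩ := List.exists_cons_of_ne_nil hr
      have h' : (c :: r').getLast? = some false := by
        rwa [List.getLast?_cons_cons] at h
      simpa [pvRunLen] using ih h'

theorem pvGo_agree (n : Nat) : ∀ (l : List Bool), l.length = n → ∀ (bs bsz : Int)
    (i : Nat) (acc : List (List Int)) (s e : Int),
    ((l = [] ∨ l.getLast? = some false) →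
      pvAGo l i bs bsz acc s e false = acc ++ pvBGo l i bs bsz) ∧
    (l.getLast? = some false →
      pvAGo l i bs bsz acc s e true =
        acc ++ [[s, ((i + pvRunLen l : Nat) : Int) * bs + bsz]]
            ++ pvBGo (l.drop (pvRunLen l + 1)) (i + pvRunLen l + 1) bs bsz) := by
  induction n using Nat.strong_induction_on with
  | _ n IH =>
    intro l hlen bs bsz i acc s e
    match l with
    | [] =>
      refine ⟨fun _ => by simp [pvAGo, pvBGo], fun h => by simp at h⟩
    | b :: rest =>
      have hrlen : rest.length < n := by simp at hlen; omega
      cases b with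
      | false =>
        constructor
        · intro hF
          have hrest : rest = [] ∨ rest.getLast? = some false := by
            cases rest with
            | nil => exact Or.inl rfl
            | cons c r =>
              refine Or.inr ?_
              have := hF.resolve_left (by simp)
              rwa [List.getLast?_cons_cons] at this
          have := (IH rest.length hrlen rest rfl bs bsz (i + 1) acc s e).1 hrest
          simpa [pvAGo, pvBGo] using this
        · intro h
          have hrest : rest = [] ∨ rest.getLast? = some false := by
            cases rest with
            | nil => exact Or.inl rfl
            | cons c r =>
              exact Or.inr (by rwa [List.getLast?_cons_cons] at h)
          have := (IH rest.length hrlen rest rfl bs bsz (i + 1)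
            (acc ++ [[s, (i : Int) * bs + bsz]]) 0 0).1 hrest
          simp [pvAGo, pvRunLen] at this ⊢
          simp [this]
      | true =>
        have key : (true :: rest).getLast? = some false →
            rest.getLast? = some false := by
          intro h
          cases rest with
          | nil => simp at h
          | cons c r => rwa [List.getLast?_cons_cons] at h
        constructor
        · intro hF
          have h' : rest.getLast? = some false := key (hF.resolve_left (by simp))
          have hT := (IH rest.length hrlen rest rfl bs bsz (i + 1) acc ((i : Int) * bs) e).2 h'
          have hdrop := drop_runLen rest h'
          simp only [pvAGo, Bool.not_false, Bool.and_true, if_true]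
          rw [hT]
          conv_rhs => rw [pvBGo]
          simp only [if_true, List.cons_append, List.append_assoc]
          rw [hdrop]
          conv_rhs => rw [pvBGo]
          simp
        · intro h
          have h' : rest.getLast? = some false := key h
          have hT := (IH rest.length hrlen rest rfl bs bsz (i + 1) acc s e).2 h'
          have e2 : i + (pvRunLen rest + 1) = i + 1 + pvRunLen rest := by omega
          simp only [pvAGo, pvRunLen, Bool.not_true, Bool.and_false, Bool.false_and,
            Bool.false_eq_true, if_false, List.drop_succ_cons, e2]
          exact hT

-- ===== VERDICT (by name: the statement is the Claim_ definition above) =====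
theorem get_activation_intervals_spec : Claim_equal_get_activation_intervals := by
  intro tl bs bsz _
  unfold Spec_get_activation_intervals get_activation_intervals get_activation_intervals_alt
  have h : (tl ++ [false]).getLast? = some false := by simp
  exact ((pvGo_agree (tl ++ [false]).length (tl ++ [false]) rfl bs bsz 0 [] 0 0).1 (Or.inr h))
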